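-- pv_equiv track=rewrite | github.com/TATOAO/labuladong-challenge | Advanced/D6-D7.回溯法/78.子集.py | de_module
-- ===== SOURCE A (Python) =====
-- def de_module(n,LL):
--
--     temp = []
--
--     while n >= 2:
--         temp.append(n%2)
--         n = n // 2
--     temp.append(n)
--
--     for i in range(LL-len(temp)):
--         temp.append(0)
--     temp.reverse()
--
--     result = []
--     for i in range(len(temp)):
--         if temp[i] != 0:
--             result.append(i)
--     return result
-- ===== SOURCE B (Python) =====
-- def de_module(n, LL):
--     nbits = n.bit_length() if n >= 2 else 1
--     L = max(LL, nbits)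
--     if n >= 2:
--         return [L - 1 - j for j in reversed(range(nbits)) if (n >> j) & 1]
--     return [L - 1] if n != 0 else []
-- ===== Notes on version B (the rewrite author's own statement) =====
-- stated objective: faster
-- what changed: A builds the full binary digit list, zero-pads it to length LL, reverses it and scans every cell for nonzero entries; B computes bit_length once and emits the set-bit positions directly from n's bits (MSB first) with no digit list, no padding and no reverse, handling n < 2 as a separate constant-time case.
import Mathlib
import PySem

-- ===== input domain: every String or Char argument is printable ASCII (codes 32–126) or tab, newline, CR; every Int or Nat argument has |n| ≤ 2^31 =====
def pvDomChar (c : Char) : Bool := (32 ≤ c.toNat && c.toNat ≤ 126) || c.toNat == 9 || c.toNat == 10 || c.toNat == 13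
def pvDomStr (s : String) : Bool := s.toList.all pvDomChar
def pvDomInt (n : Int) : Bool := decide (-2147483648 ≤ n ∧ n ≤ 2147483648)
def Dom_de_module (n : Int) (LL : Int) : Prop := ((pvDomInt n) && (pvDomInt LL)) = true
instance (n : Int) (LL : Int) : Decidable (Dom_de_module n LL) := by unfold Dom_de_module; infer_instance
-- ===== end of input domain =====

-- B replaces A's build-digits/zero-pad/reverse/scan pipeline by emitting the set-bit positions
-- directly from n's bits (objective: faster — A touches O(max(LL, log n)) cells, B only O(log n) bits).

-- ===== PORT A =====
-- the `while n >= 2` loop: append n%2, n //= 2 (Python-exact // and % via PySem)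
def deLoop (temp : List Int) (n : Int) : List Int × Int :=
  if 2 ≤ n then deLoop (temp ++ [PySem.Int.mod n 2]) (PySem.Int.floordiv n 2) else (temp, n)
termination_by n.toNat
decreasing_by
  rename_i h
  rw [PySem.Int.floordiv_eq_ediv_of_pos (by omega : (0:Int) < 2)]
  omega

def de_module (n : Int) (LL : Int) : List Int :=
  let p := deLoop [] n
  let t1 := p.1 ++ [p.2]
  let t2 := (PySem.List.pyRange 0 (LL - t1.length) 1).foldl (fun t _ => t ++ [(0:Int)]) t1
  let t3 := t2.reverse
  (PySem.List.pyRange 0 t3.length 1).foldl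
    (fun r i => if PySem.List.pyGetD t3 i 0 ≠ 0 then r ++ [i] else r) []

-- ===== PORT B =====
-- B: nbits = n.bit_length() if n >= 2 else 1; L = max(LL, nbits); positions emitted MSB-first
def de_module_alt (n : Int) (LL : Int) : List Int :=
  let nbits : Int := if 2 ≤ n then (PySem.Int.bitLength n : Int) else 1
  let L := max LL nbits
  if 2 ≤ n then
    (PySem.List.pyRange 0 nbits 1).reverse.filterMap
      (fun j => if PySem.Int.band (n >>> j.toNat) 1 ≠ 0 then some (L - 1 - j) else none)
  else if n ≠ 0 then [L - 1] else []



-- ===== PRECONDITION & SPEC =====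
def Spec_de_module (n : Int) (LL : Int) (out : List Int) : Prop := out = de_module_alt n LL
instance (n : Int) (LL : Int) (out : List Int) : Decidable (Spec_de_module n LL out) := by unfold Spec_de_module; infer_instance

-- ===== CLAIM (what is proved, stated in full; the proofs are below) =====
def Claim_equal_de_module : Prop := ∀ (n : Int) (LL : Int), Dom_de_module n LL → Spec_de_module n LL (de_module n LL)

-- ===== LEMMAS AND PROOFS =====
-- digit list of m, LSB first, as Ints
def pvBits (m : Nat) : List Int :=
  (List.range (PySem.Int.bitLength (m : Int))).map (fun j => if m.testBit j then (1:Int) else 0)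

theorem pvBits_one : pvBits 1 = [1] := by decide

theorem pvBits_cons (m : Nat) (h : 2 ≤ m) :
    pvBits m = ((m % 2 : Nat) : Int) :: pvBits (m / 2) := by
  unfold pvBits
  rw [PySem.Int.bitLength_natCast (show 0 < m by omega)]
  rw [List.range_succ_eq_map]
  simp [List.map_map, Function.comp_def, Nat.testBit_succ]
  split_ifs <;> omega

theorem deLoop_spec (m : Nat) (h : 2 ≤ m) (temp : List Int) :
    (deLoop temp (m : Int)).1 ++ [(deLoop temp (m : Int)).2] = temp ++ pvBits m := by
  induction m using Nat.strong_induction_on generalizing temp with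
  | _ m ih =>
    rw [deLoop]
    rw [if_pos (by exact_mod_cast h)]
    have e1 : PySem.Int.mod (↑m) 2 = ((m % 2 : Nat) : Int) := by
      exact_mod_cast PySem.Int.mod_natCast m 2
    have e2 : PySem.Int.floordiv (↑m) 2 = ((m / 2 : Nat) : Int) := by
      exact_mod_cast PySem.Int.floordiv_natCast m 2
    rw [e1, e2]
    by_cases h2 : 2 ≤ m / 2
    · rw [ih (m / 2) (by omega) h2]
      rw [pvBits_cons m h]
      simp
    · have hm2 : m / 2 = 1 := by omega
      rw [hm2]
      rw [deLoop]
      rw [if_neg (by norm_num)]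
      rw [pvBits_cons m h, hm2, pvBits_one]
      simp

theorem zerosFold (l : List Int) (init : List Int) :
    l.foldl (fun t _ => t ++ [(0:Int)]) init = init ++ List.replicate l.length 0 := by
  induction l generalizing init with
  | nil => simp
  | cons x xs ih =>
    simp only [List.foldl_cons, ih, List.length_cons]
    rw [List.replicate_succ, List.append_assoc]
    congr 1

theorem resultFold (t3 : List Int) :
    (PySem.List.pyRange 0 (t3.length : Int) 1).foldl
      (fun r i => if PySem.List.pyGetD t3 i 0 ≠ 0 then r ++ [i] else r) []
    = ((List.range t3.length).filter (fun k => t3.getD k 0 ≠ 0)).map (fun k : Nat => (k : Int)) := by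
  rw [PySem.List.pyRange_zero_nat]
  rw [List.foldl_map]
  have := PySem.List.foldl_append_if
      (fun k : Nat => decide (PySem.List.pyGetD t3 (k : Int) 0 ≠ 0))
      (fun k : Nat => (k : Int)) (List.range t3.length) []
  simp only [decide_eq_true_eq] at this
  rw [this]
  simp only [List.nil_append, PySem.List.pyGetD_natCast]


theorem getD_pad_lt (p : Nat) (l : List Int) (k : Nat) (h : k < p) :
    (List.replicate p (0:Int) ++ l).getD k 0 = 0 := by
  rw [List.getD_eq_getElem _ _ (by simp; omega)]
  rw [List.getElem_append_left (by simpa using h)]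
  simp

theorem getD_pad_ge (l l' : List Int) (k : Nat) :
    (l ++ l').getD (l.length + k) 0 = l'.getD k 0 := by
  simp [List.getD, List.getElem?_append_right]

theorem filterMap_ite_some (f : Nat → Int) (P : Nat → Bool) (l : List Nat) :
    l.filterMap (fun i => if P i then some (f i) else none) = (l.filter P).map f := by
  induction l with
  | nil => rfl
  | cons x xs ih => by_cases h : P x <;> simp [h, ih]

theorem getD_reverse (l : List Int) (i : Nat) (h : i < l.length) :
    l.reverse.getD i 0 = l.getD (l.length - 1 - i) 0 := by
  rw [List.getD_eq_getElem _ _ (by simpa using h), List.getD_eq_getElem _ _ (by omega)]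
  simp [List.getElem_reverse]

theorem range_reverse (n : Nat) : (List.range n).reverse = (List.range n).map (fun i => n - 1 - i) := by
  induction n with
  | zero => rfl
  | succ k ih =>
    conv_lhs => rw [List.range_succ]
    conv_rhs => rw [List.range_succ_eq_map]
    simp [ih, List.map_map, Function.comp_def]
    exact fun a ha => by omega

theorem bit_ne_iff (m j : Nat) :
    (PySem.Int.band ((m : Int) >>> ((j:Nat):Int)) 1 ≠ 0) ↔ m.testBit j := by
  rw [Int.shiftRight_natCast m j]
  have e : PySem.Int.band ((m >>> j : Nat) : Int) 1 = (((m >>> j) &&& 1 : Nat) : Int) := by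
    exact_mod_cast PySem.Int.band_natCast (m >>> j) 1
  rw [e, Nat.and_one_is_mod]
  simp only [Nat.testBit, Nat.one_and_eq_mod_two, bne_iff_ne, ne_eq]
  omega

theorem de_module_closed (n LL : Int) :
    de_module n LL =
      (let t1 := (deLoop [] n).1 ++ [(deLoop [] n).2]
       let t3 := List.replicate (LL - t1.length).toNat (0:Int) ++ t1.reverse
       ((List.range t3.length).filter (fun k => t3.getD k 0 ≠ 0)).map (fun k : Nat => (k : Int))) := by
  unfold de_module
  dsimp only
  rw [zerosFold]
  rw [PySem.List.length_pyRange_one]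
  rw [List.reverse_append, List.reverse_replicate]
  rw [← resultFold]
  norm_num

theorem filterIdx (p : Nat) (ds : List Int) :
    (List.range (List.replicate p (0:Int) ++ ds).length).filter
        (fun k => decide ((List.replicate p (0:Int) ++ ds).getD k 0 ≠ 0))
    = ((List.range ds.length).filter (fun i => decide (ds.getD i 0 ≠ 0))).map (fun i => p + i) := by
  rw [List.length_append, List.length_replicate, List.range_add, List.filter_append]
  have h1 : (List.range p).filter (fun k => decide ((List.replicate p (0:Int) ++ ds).getD k 0 ≠ 0)) = [] := by
    rw [List.filter_eq_nil_iff]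
    intro k hk
    rw [List.mem_range] at hk
    simp only [decide_eq_true_eq, ne_eq, not_not]
    exact getD_pad_lt p ds k hk
  rw [h1, List.nil_append, List.filter_map]
  congr 1
  apply List.filter_congr
  intro i _
  have := getD_pad_ge (List.replicate p (0:Int)) ds i
  simp only [List.length_replicate] at this
  simp only [Function.comp_apply]
  rw [this]

theorem main_small (n LL : Int) (h : ¬ 2 ≤ n) : de_module n LL = de_module_alt n LL := by
  rw [de_module_closed]
  unfold de_module_alt
  dsimp only
  rw [deLoop, if_neg h, if_neg h, if_neg h]
  simp only [List.nil_append, List.reverse_cons, List.reverse_nil, List.length_singleton]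
  rw [filterIdx (LL - ((1:Nat):Int)).toNat [n]]
  by_cases h0 : n = 0
  · simp [h0]
  · rw [if_pos h0]
    have : (List.range [n].length).filter (fun i => decide ([n].getD i 0 ≠ 0)) = [0] := by
      simp [List.range_succ, h0]
    rw [this]
    simp only [List.map_cons, List.map_nil]
    show [((((LL - ((1:Nat):Int)).toNat + 0 : Nat)) : Int)] = [max LL 1 - 1]
    rcases le_total LL 1 with hc | hc
    · rw [max_eq_right hc]
      simp
      omega
    · rw [max_eq_left hc]
      simp
      omega

theorem main_big (n LL : Int) (h : 2 ≤ n) : de_module n LL = de_module_alt n LL := by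
  obtain ⟨m, rfl⟩ : ∃ m : Nat, n = (m : Int) := ⟨n.toNat, (Int.toNat_of_nonneg (by omega)).symm⟩
  have hm : 2 ≤ m := by exact_mod_cast h
  have hsz1 : 1 ≤ PySem.Int.bitLength ((m:Nat) : Int) := by
    rw [PySem.Int.bitLength_natCast (show 0 < m by omega)]
    omega
  set sz := PySem.Int.bitLength ((m:Nat) : Int) with hszdef
  have hlen : (pvBits m).length = sz := by
    simp only [pvBits, List.length_map, List.length_range]
    exact hszdef.symm
  -- A side
  rw [de_module_closed]
  dsimp only
  rw [deLoop_spec m hm []]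
  simp only [List.nil_append, hlen]
  rw [filterIdx (LL - (sz:Int)).toNat ((pvBits m).reverse)]
  set p := (LL - (sz:Int)).toNat with hpdef
  have hfilter : (List.range (pvBits m).reverse.length).filter
        (fun i => decide ((pvBits m).reverse.getD i 0 ≠ 0))
      = (List.range sz).filter (fun i => m.testBit (sz - 1 - i)) := by
    rw [List.length_reverse, hlen]
    apply List.filter_congr
    intro i hi
    rw [List.mem_range] at hi
    rw [getD_reverse _ _ (by rw [hlen]; exact hi), hlen]
    have hd : (pvBits m).getD (sz - 1 - i) 0 = if m.testBit (sz - 1 - i) then (1:Int) else 0 := by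
      rw [List.getD_eq_getElem _ _ (by rw [hlen]; omega)]
      simp [pvBits]
    rw [hd]
    by_cases hb : m.testBit (sz - 1 - i) <;> simp [hb]
  rw [hfilter, List.map_map]
  -- B side
  unfold de_module_alt
  dsimp only
  rw [if_pos h, if_pos h, ← hszdef]
  rw [PySem.List.pyRange_zero_nat sz]
  rw [← List.map_reverse, range_reverse, List.map_map]
  rw [List.filterMap_map]
  have hmax : max LL ((sz:Nat) : Int) = ((p + sz : Nat) : Int) := by
    rcases le_total LL ((sz:Nat):Int) with hc | hc
    · rw [max_eq_right hc]; omega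
    · rw [max_eq_left hc]; omega
  symm
  trans (List.filterMap (fun i => if m.testBit (sz - 1 - i) then some (((p + i : Nat)) : Int) else none)
      (List.range sz))
  · apply List.filterMap_congr
    intro i hi
    rw [List.mem_range] at hi
    simp only [Function.comp_apply, Int.toNat_natCast]
    by_cases hb : m.testBit (sz - 1 - i)
    · rw [if_pos ((bit_ne_iff m (sz - 1 - i)).mpr hb), if_pos hb, hmax]
      congr 1
      omega
    · rw [if_neg (fun hc => hb ((bit_ne_iff m (sz - 1 - i)).mp hc)), if_neg hb]
  · rw [filterMap_ite_some (fun i => (((p + i : Nat)) : Int)) (fun i => m.testBit (sz - 1 - i))]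
    simp [Function.comp_def]

theorem de_module_eq (n LL : Int) : de_module n LL = de_module_alt n LL := by
  by_cases h : 2 ≤ n
  · exact main_big n LL h
  · exact main_small n LL h

-- ===== VERDICT (by name: the statement is the Claim_ definition above) =====
theorem de_module_spec : Claim_equal_de_module := by
  intro n LL _
  show de_module n LL = de_module_alt n LL
  exact de_module_eq n LL
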